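-- pv_equiv track=rewrite | github.com/sh95fit/CodingTest | 프로그래머스/Lv.0/181931. 등차수열의 특정한 항만 더하기/등차수열의 특정한 항만 더하기.py | solution
-- ===== SOURCE A (Python) =====
-- def solution(a, d, included):
--     answer = 0
--     res = a
--     for i in range(len(included)):
--         if included[i] :
--             answer += res
--             res += d
--         else :
--             res += d
--     return answer
-- ===== SOURCE B (Python) =====
-- def solution(a, d, included):
--     # Divide and conquer: the sum over a segment starting at term `base`
--     # splits into the left half (base unchanged) and the right half,
--     # whose first term is shifted by d*mid.
--     def solve(base, seg):
--         if not seg: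
--             return 0
--         if len(seg) == 1:
--             return base if seg[0] else 0
--         mid = len(seg) // 2
--         return solve(base, seg[:mid]) + solve(base + d * mid, seg[mid:])
--     return solve(a, included)
-- ===== Notes on version B (the rewrite author's own statement) =====
-- stated objective: alternative
-- what changed: Replaces A's single linear pass with a running-term accumulator by a divide-and-conquer recursion: split the segment at its midpoint, solve the halves independently (shifting the right half's base term by d*mid), and add the two partial sums.
import Mathlib
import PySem

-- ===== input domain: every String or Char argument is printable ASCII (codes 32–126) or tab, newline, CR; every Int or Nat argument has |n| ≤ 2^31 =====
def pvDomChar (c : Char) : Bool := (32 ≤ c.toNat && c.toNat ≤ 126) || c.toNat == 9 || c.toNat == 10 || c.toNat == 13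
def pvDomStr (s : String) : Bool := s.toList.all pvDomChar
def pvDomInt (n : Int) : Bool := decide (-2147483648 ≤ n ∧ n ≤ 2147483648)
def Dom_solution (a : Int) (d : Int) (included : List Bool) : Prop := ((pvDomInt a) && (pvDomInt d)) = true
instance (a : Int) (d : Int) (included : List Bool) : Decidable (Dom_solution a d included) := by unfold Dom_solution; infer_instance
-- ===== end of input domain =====

-- B replaces A's linear running-term loop by a divide-and-conquer recursion that splits
-- the segment at its midpoint and shifts the right half's base term by d*mid (alternative).

-- ===== PORT A =====
-- the for-loop over range(len(included)): state (answer, res), branch order as in A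
def solutionLoop (d : Int) : List Bool → Int → Int → Int
  | [], answer, _ => answer
  | b :: rest, answer, res =>
    if b then solutionLoop d rest (answer + res) (res + d)
    else solutionLoop d rest answer (res + d)

def solution (a : Int) (d : Int) (included : List Bool) : Int :=
  solutionLoop d included 0 a

-- ===== PORT B =====
-- Source B's inner `solve(base, seg)`; Python slices seg[:mid]/seg[mid:] with 0 ≤ mid ≤ len(seg)
-- are exactly List.take/List.drop, so the port is exact.
def solveB (d : Int) (base : Int) (seg : List Bool) : Int :=
  if seg = [] then 0
  else if seg.length = 1 then (if seg.headD false then base else 0)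
  else
    let mid : Nat := seg.length / 2
    solveB d base (seg.take mid) + solveB d (base + d * (mid : Int)) (seg.drop mid)
termination_by seg.length
decreasing_by
  all_goals
    have : seg.length ≥ 2 := by
      cases seg with
      | nil => simp_all
      | cons x t => cases t <;> simp_all
    simp [List.length_take, List.length_drop]
    omega

def solution_alt (a : Int) (d : Int) (included : List Bool) : Int :=
  solveB d a included

-- ===== PRECONDITION & SPEC =====
def Spec_solution (a : Int) (d : Int) (included : List Bool) (out : Int) : Prop := out = solution_alt a d included
instance (a : Int) (d : Int) (included : List Bool) (out : Int) : Decidable (Spec_solution a d included out) := by unfold Spec_solution; infer_instance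

-- ===== CLAIM (what is proved, stated in full; the proofs are below) =====
def Claim_equal_solution : Prop := ∀ (a : Int) (d : Int) (included : List Bool), Dom_solution a d included → Spec_solution a d included (solution a d included)

-- ===== LEMMAS AND PROOFS =====

-- mathematical count of truthy entries
def cntB : List Bool → Int
  | [] => 0
  | b :: t => (if b then 1 else 0) + cntB t

-- mathematical index-weighted sum of truthy entries (indexing from 0)
def wsB : List Bool → Int
  | [] => 0
  | _ :: t => wsB t + cntB t

theorem cntB_append (s t : List Bool) : cntB (s ++ t) = cntB s + cntB t := by
  induction s with
  | nil => simp [cntB]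
  | cons b r ih => simp [cntB, ih]; ring

theorem wsB_append (s t : List Bool) :
    wsB (s ++ t) = wsB s + wsB t + (s.length : Int) * cntB t := by
  induction s with
  | nil => simp [wsB]
  | cons b r ih => simp [wsB, cntB_append, ih]; ring

theorem solutionLoop_eq (d : Int) : ∀ (l : List Bool) (ans res : Int),
    solutionLoop d l ans res = ans + res * cntB l + d * wsB l := by
  intro l
  induction l with
  | nil => intro ans res; simp [solutionLoop, cntB, wsB]
  | cons b t ih =>
    intro ans res
    cases b <;> simp [solutionLoop, cntB, wsB, ih] <;> ring

theorem solveB_eq (d base : Int) (seg : List Bool) :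
    solveB d base seg = base * cntB seg + d * wsB seg := by
  induction base, seg using solveB.induct d with
  | case1 base => simp [solveB, cntB, wsB]
  | case2 base seg h1 h2 hb =>
    match seg, h2 with
    | [b], _ => cases b <;> simp_all [solveB, cntB, wsB]
  | case3 base seg h1 h2 hb =>
    match seg, h2 with
    | [b], _ => cases b <;> simp_all [solveB, cntB, wsB]
  | case4 base seg h1 h2 mid ih1 ih2 =>
    rw [solveB]
    rw [if_neg h1, if_neg h2]
    simp only []
    rw [ih1, ih2]
    have hmid : (seg.take (seg.length / 2)).length = seg.length / 2 := by
      simp [List.length_take]; omega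
    conv_rhs => rw [← List.take_append_drop (seg.length / 2) seg]
    rw [cntB_append, wsB_append, hmid]
    ring

theorem solution_eq_alt (a d : Int) (included : List Bool) :
    solution a d included = solution_alt a d included := by
  simp [solution, solution_alt, solutionLoop_eq, solveB_eq]

-- ===== VERDICT (by name: the statement is the Claim_ definition above) =====
theorem solution_spec : Claim_equal_solution := by
  intro a d included _
  unfold Spec_solution
  exact solution_eq_alt a d included
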